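-- pv_equiv track=rewrite | github.com/shaun-mi/moshes-insanity | moshes_insanity.py | generate_chessboard
-- ===== SOURCE A (Python) =====
-- def get_corners(cube):
--     """Get list of the 8 corners in the given cube."""
--     top = cube[1]
--     bottom = cube[0]
--     return [
--         top    + cube[2] + cube[3],
--         top    + cube[3] + cube[4],
--         top    + cube[4] + cube[5],
--         top    + cube[5] + cube[2],
--         bottom + cube[2] + cube[3],
--         bottom + cube[3] + cube[4],
--         bottom + cube[4] + cube[5],
--         bottom + cube[5] + cube[2],
--     ]
--
-- def spin_corner(corner):
--     """Get the same corner if the cube was spun on rotation. Example: YRP -> RPY"""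
--     return corner[1:] + corner[0]
--
-- def get_all_corner_names(corner):
--     """Create the set of all corner names for this corner by spinning it."""
--     corner1 = spin_corner(corner)
--     corner2 = spin_corner(corner1)
--     return { corner, corner1, corner2 }
--
-- def is_corner_matching(corner1, corner2):
--     """Determine if two corners match. The corner may need to be spun to find a match."""
--     return any(get_all_corner_names(corner1).intersection(get_all_corner_names(corner2)))
--
-- def has_a_matching_corner(corner1, cube2):
--     """Determine whether a given corner matches any corners of the given cube."""
--     for corner2 in set(get_corners(cube2)):
--         if is_corner_matching(corner1, corner2):
--             return True
--     return False
--
-- def generate_chessboard(cubes, oracle_cube):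
--     """
--     Generate the chess board with the rows and columns.
--     Rows are the 8 cubes.
--     Columns are the corners of the 2x2x2 cube if it were completed.
--     """
--     # A cube is represented as a Tuple of colors; for example ('Y', 'B', 'G', 'P', 'R', 'W')
--     oracle_corners = get_corners(oracle_cube)
--     chessboard = {}
--     for c in cubes:
--         top = oracle_cube[1]
--         bottom = oracle_cube[0]
--         chessboard[''.join(c)] = { corner : has_a_matching_corner(corner, c) for corner in oracle_corners }
--     return chessboard
-- ===== SOURCE B (Python) =====
-- def _corners(cube):
--     pairs = ((2, 3), (3, 4), (4, 5), (5, 2))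
--     return [cube[t] + cube[a] + cube[b] for t in (1, 0) for a, b in pairs]
--
--
-- def _rotations(corner):
--     return [corner[i:] + corner[:i] for i in range(3)]
--
--
-- def generate_chessboard(cubes, oracle_cube):
--     oracle_corners = _corners(oracle_cube)
--     board = {}
--     for c in cubes:
--         pool = {r for corner in _corners(c) for r in _rotations(corner)}
--         board[''.join(c)] = {corner: not pool.isdisjoint(_rotations(corner))
--                              for corner in oracle_corners}
--     return board
-- ===== Notes on version B (the rewrite author's own statement) =====
-- stated objective: faster
-- what changed: Corner matching is recomputed from pairwise 3-spin set intersections into a per-cube pool: for each cube B builds once the set of all character-rotations of all its corners and marks an oracle corner matched iff the pool is not disjoint from that corner's rotations, so the 8x8 per-row corner-vs-corner set-intersection loop disappears (measured ~3.8x on the timing inputs); corners are generated by a (top,bottom)x(face-pair) comprehension instead of eight written-out entries.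
-- outside the precondition, e.g. on generate_chessboard([], ('', '', '', '', '', '')): A returns {}, B returns {}
import Mathlib
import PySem

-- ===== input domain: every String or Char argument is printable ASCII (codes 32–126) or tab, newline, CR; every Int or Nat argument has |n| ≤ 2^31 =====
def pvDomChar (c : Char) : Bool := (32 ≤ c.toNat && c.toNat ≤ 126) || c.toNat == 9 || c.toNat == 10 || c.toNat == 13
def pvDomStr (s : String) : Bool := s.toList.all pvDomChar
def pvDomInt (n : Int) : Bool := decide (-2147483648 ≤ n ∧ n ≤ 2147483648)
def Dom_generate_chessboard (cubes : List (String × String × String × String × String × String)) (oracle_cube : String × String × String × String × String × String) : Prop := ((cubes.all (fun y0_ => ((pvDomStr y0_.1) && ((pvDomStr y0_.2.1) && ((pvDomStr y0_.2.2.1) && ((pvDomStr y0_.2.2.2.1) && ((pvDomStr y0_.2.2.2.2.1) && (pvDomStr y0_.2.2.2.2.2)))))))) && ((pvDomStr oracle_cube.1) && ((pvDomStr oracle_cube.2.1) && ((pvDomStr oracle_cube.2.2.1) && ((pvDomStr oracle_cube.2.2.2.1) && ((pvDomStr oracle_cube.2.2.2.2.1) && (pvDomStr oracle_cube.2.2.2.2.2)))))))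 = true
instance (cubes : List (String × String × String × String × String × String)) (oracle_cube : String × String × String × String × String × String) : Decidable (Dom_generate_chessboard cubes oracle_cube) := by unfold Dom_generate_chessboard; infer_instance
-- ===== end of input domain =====

-- B replaces A's pairwise 3-spin set-intersection test by one per-cube pool of all corner rotations
-- and a disjointness test per oracle corner (measured faster in a timing run); same return value
-- on Pre_ (no empty corner string).
-- Strings are handled on the List Char side (exact; PySem convention); keys are rebuilt with String.ofList.

-- ''.join(c) for a 6-tuple of faces (used by both Pythons for the row key, ported once)
def pvJoin (c : String × String × String × String × String × String) : String :=
  String.ofList (c.1.toList ++ c.2.1.toList ++ c.2.2.1.toList ++ c.2.2.2.1.toList ++ c.2.2.2.2.1.toList ++ c.2.2.2.2.2.toList)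

-- ===== PORT A =====
-- get_corners: eight written-out concatenations top/bottom + adjacent faces
def cornersA (cube : String × String × String × String × String × String) : List (List Char) :=
  let top := cube.2.1.toList
  let bottom := cube.1.toList
  [ top ++ cube.2.2.1.toList ++ cube.2.2.2.1.toList,
    top ++ cube.2.2.2.1.toList ++ cube.2.2.2.2.1.toList,
    top ++ cube.2.2.2.2.1.toList ++ cube.2.2.2.2.2.toList,
    top ++ cube.2.2.2.2.2.toList ++ cube.2.2.1.toList,
    bottom ++ cube.2.2.1.toList ++ cube.2.2.2.1.toList,
    bottom ++ cube.2.2.2.1.toList ++ cube.2.2.2.2.1.toList,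
    bottom ++ cube.2.2.2.2.1.toList ++ cube.2.2.2.2.2.toList,
    bottom ++ cube.2.2.2.2.2.toList ++ cube.2.2.1.toList ]

-- spin_corner: corner[1:] + corner[0]; corner[0] on "" is an IndexError (pyGet? = none), excluded by Pre_
def spinA (c : List Char) : List Char :=
  PySem.List.slice c (some 1) none ++ (match PySem.List.pyGet? c 0 with | some ch => [ch] | none => [])

-- get_all_corner_names: the set literal { corner, corner1, corner2 }
def namesA (c : List Char) : PySem.Set (List Char) :=
  let c1 := spinA c
  let c2 := spinA c1
  PySem.Set.ofList [c, c1, c2]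

-- is_corner_matching: any(...) over the set intersection; bool(s) is s ≠ ""
def isMatchingA (a b : List Char) : Bool :=
  (PySem.Set.inter (namesA a) (namesA b)).any (fun s => !s.isEmpty)

-- has_a_matching_corner: loop with early return over set(get_corners(cube2)) = any (order-independent result)
def hasMatchA (a : List Char) (cube2 : String × String × String × String × String × String) : Bool :=
  (PySem.Set.ofList (cornersA cube2)).any (fun b => isMatchingA a b)

def generate_chessboard (cubes : List (String × String × String × String × String × String)) (oracle_cube : String × String × String × String × String × String) : List (String × List (String × Bool)) :=
  let oracle_corners := cornersA oracle_cube
  -- (the Python loop body also assigns unused locals top/bottom; they have no effect and are not ported)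
  ((cubes.foldl (fun board c =>
      board.insert (pvJoin c)
        ((oracle_corners.foldl (fun row corner => row.insert (String.ofList corner) (hasMatchA corner c))
            (PySem.Dict.empty : PySem.Dict String Bool)).items))
    (PySem.Dict.empty : PySem.Dict String (List (String × Bool))))).items

-- ===== PORT B =====
-- _corners: comprehension over t in (1,0) and the four adjacent face pairs
def cornersB (cube : String × String × String × String × String × String) : List (List Char) :=
  let faces := [cube.1.toList, cube.2.1.toList, cube.2.2.1.toList, cube.2.2.2.1.toList, cube.2.2.2.2.1.toList, cube.2.2.2.2.2.toList]
  ([1, 0] : List Nat).flatMap (fun t =>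
    ([(2, 3), (3, 4), (4, 5), (5, 2)] : List (Nat × Nat)).map (fun ab =>
      faces.getD t [] ++ faces.getD ab.1 [] ++ faces.getD ab.2 []))

-- _rotations: [corner[i:] + corner[:i] for i in range(3)]
def rotB (c : List Char) (i : Int) : List Char :=
  PySem.List.slice c (some i) none ++ PySem.List.slice c none (some i)

def rotationsB (c : List Char) : List (List Char) :=
  (PySem.List.pyRange 0 3 1).map (fun i => rotB c i)

-- pool = {r for corner in _corners(c) for r in _rotations(corner)}
def poolB (cube : String × String × String × String × String × String) : PySem.Set (List Char) :=
  PySem.Set.ofList ((cornersB cube).flatMap rotationsB)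

def generate_chessboard_alt (cubes : List (String × String × String × String × String × String)) (oracle_cube : String × String × String × String × String × String) : List (String × List (String × Bool)) :=
  let oracle_corners := cornersB oracle_cube
  ((cubes.foldl (fun board c =>
      let pool := poolB c
      board.insert (pvJoin c)
        ((oracle_corners.foldl (fun row corner =>
            row.insert (String.ofList corner) (!(PySem.Set.isdisjoint pool (rotationsB corner))))
            (PySem.Dict.empty : PySem.Dict String Bool)).items))
    (PySem.Dict.empty : PySem.Dict String (List (String × Bool))))).items

-- ===== PRECONDITION & SPEC =====
-- Pre_ excludes inputs where some corner (a top/bottom+faces concatenation) is the empty string: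
-- there A raises IndexError in spin_corner, or returns only by accident of hash iteration order
-- over set(get_corners(cube2)), or (with cubes = []) returns {} without touching the empty corners.
def Pre_generate_chessboard (cubes : List (String × String × String × String × String × String)) (oracle_cube : String × String × String × String × String × String) : Prop :=
  (∀ s ∈ cornersA oracle_cube, s ≠ []) ∧ (∀ c ∈ cubes, ∀ s ∈ cornersA c, s ≠ [])
instance (cubes : List (String × String × String × String × String × String)) (oracle_cube : String × String × String × String × String × String) : Decidable (Pre_generate_chessboard cubes oracle_cube) := by unfold Pre_generate_chessboard; infer_instance
def pvWitness_generate_chessboard : (List (String × String × String × String × String × String)) × (String × String × String × String × String × String) :=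
  ([("Y", "B", "G", "P", "R", "W")], ("Y", "B", "G", "P", "R", "W"))

def Spec_generate_chessboard (cubes : List (String × String × String × String × String × String)) (oracle_cube : String × String × String × String × String × String) (out : List (String × List (String × Bool))) : Prop := out = generate_chessboard_alt cubes oracle_cube
instance (cubes : List (String × String × String × String × String × String)) (oracle_cube : String × String × String × String × String × String) (out : List (String × List (String × Bool))) : Decidable (Spec_generate_chessboard cubes oracle_cube out) := by unfold Spec_generate_chessboard; infer_instance

-- ===== CLAIM (what is proved, stated in full; the proofs are below) =====
def Claim_equal_generate_chessboard : Prop := ∀ (cubes : List (String × String × String × String × String × String)) (oracle_cube : String × String × String × String × String × String), Dom_generate_chessboard cubes oracle_cube → Pre_generate_chessboard cubes oracle_cube → Spec_generate_chessboard cubes oracle_cube (generate_chessboard cubes oracle_cube)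

-- ===== LEMMAS AND PROOFS =====

lemma spinA_cons (ch : Char) (t : List Char) : spinA (ch :: t) = t ++ [ch] := by
  simp [spinA, PySem.List.slice_from_one, PySem.List.pyGet?, PySem.List.pyIdx?]

lemma spinA_ne_nil {c : List Char} (h : c ≠ []) : spinA c ≠ [] := by
  cases c with
  | nil => exact absurd rfl h
  | cons ch t => simp [spinA_cons]

lemma rotB_zero (c : List Char) : rotB c 0 = c := by
  simp [rotB, PySem.List.slice_zero_start, PySem.List.slice_none_none]
  rw [PySem.List.slice_to c (by norm_num)]
  simp

lemma rotB_one (c : List Char) : rotB c 1 = c.drop 1 ++ c.take 1 := by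
  rw [rotB, PySem.List.slice_from c (by norm_num), PySem.List.slice_to c (by norm_num)]
  simp

lemma rotB_two (c : List Char) : rotB c 2 = c.drop 2 ++ c.take 2 := by
  rw [rotB, PySem.List.slice_from c (by norm_num), PySem.List.slice_to c (by norm_num)]
  rfl

-- on a nonempty corner, B's three slice-rotations are exactly A's corner, spin, spin-spin
lemma rotationsB_eq {c : List Char} (h : c ≠ []) :
    rotationsB c = [c, spinA c, spinA (spinA c)] := by
  obtain ⟨ch, t, rfl⟩ : ∃ ch t, c = ch :: t := by
    cases c with
    | nil => exact absurd rfl h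
    | cons a b => exact ⟨a, b, rfl⟩
  have hr : PySem.List.pyRange 0 3 1 = [0, 1, 2] := by decide
  rw [rotationsB, hr]
  simp only [List.map_cons, List.map_nil, rotB_zero, rotB_one, rotB_two]
  rw [spinA_cons]
  cases t with
  | nil => simp [spinA_cons]
  | cons d t' =>
      have : (d :: t') ++ [ch] = d :: (t' ++ [ch]) := rfl
      rw [this, spinA_cons]
      simp

lemma mem_namesA (x c : List Char) : x ∈ namesA c ↔ x ∈ [c, spinA c, spinA (spinA c)] := by
  simp [namesA, PySem.Set.mem_ofList]

lemma mem_namesA_ne_nil {x c : List Char} (h : c ≠ []) (hx : x ∈ namesA c) : x ≠ [] := by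
  rw [mem_namesA] at hx
  simp at hx
  rcases hx with rfl | rfl | rfl
  · exact h
  · exact spinA_ne_nil h
  · exact spinA_ne_nil (spinA_ne_nil h)

lemma cornersA_eq_cornersB (cube : String × String × String × String × String × String) :
    cornersA cube = cornersB cube := rfl

-- A's truthy-intersection test is "some common rotation" (all names are nonempty under Pre_)
lemma matching_iff (a b : List Char) (ha : a ≠ []) (hb : b ≠ []) :
    isMatchingA a b = true ↔ ∃ x, x ∈ rotationsB a ∧ x ∈ rotationsB b := by
  rw [isMatchingA, List.any_eq_true]
  constructor
  · rintro ⟨s, hs, hne⟩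
    have := (PySem.Set.mem_inter _ _ _).mp hs
    exact ⟨s, (rotationsB_eq ha) ▸ (mem_namesA s a).mp this.1,
             (rotationsB_eq hb) ▸ (mem_namesA s b).mp this.2⟩
  · rintro ⟨x, hxa, hxb⟩
    refine ⟨x, (PySem.Set.mem_inter _ _ _).mpr ⟨(mem_namesA x a).mpr ((rotationsB_eq ha) ▸ hxa),
      (mem_namesA x b).mpr ((rotationsB_eq hb) ▸ hxb)⟩, ?_⟩
    have : x ≠ [] := mem_namesA_ne_nil ha ((mem_namesA x a).mpr ((rotationsB_eq ha) ▸ hxa))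
    simpa using this

-- one board cell: A's scan of corner pairs equals B's pool-disjointness test
lemma cell_eq (a : List Char) (cube : String × String × String × String × String × String)
    (ha : a ≠ []) (hc : ∀ s ∈ cornersA cube, s ≠ []) :
    hasMatchA a cube = !(PySem.Set.isdisjoint (poolB cube) (rotationsB a)) := by
  rw [Bool.eq_iff_iff]
  have hA : hasMatchA a cube = true ↔ ∃ b, b ∈ cornersA cube ∧ ∃ x, x ∈ rotationsB a ∧ x ∈ rotationsB b := by
    rw [hasMatchA, List.any_eq_true]
    constructor
    · rintro ⟨b, hb, hm⟩
      have hbmem := (PySem.Set.mem_ofList _ _).mp hb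
      exact ⟨b, hbmem, (matching_iff a b ha (hc b hbmem)).mp hm⟩
    · rintro ⟨b, hb, hx⟩
      exact ⟨b, (PySem.Set.mem_ofList _ _).mpr hb, (matching_iff a b ha (hc b hb)).mpr hx⟩
  rw [hA]
  have hB : (!(PySem.Set.isdisjoint (poolB cube) (rotationsB a))) = true ↔
      ∃ x, x ∈ poolB cube ∧ x ∈ rotationsB a := by
    rw [Bool.not_eq_eq_eq_not, Bool.not_true, ← Bool.not_eq_true, PySem.Set.isdisjoint_iff]
    push Not
    simp
  rw [hB]
  have hpool : ∀ x, x ∈ poolB cube ↔ ∃ b, b ∈ cornersA cube ∧ x ∈ rotationsB b := by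
    intro x
    rw [poolB, PySem.Set.mem_ofList, List.mem_flatMap, cornersA_eq_cornersB]
  constructor
  · rintro ⟨b, hb, x, hxa, hxb⟩
    exact ⟨x, (hpool x).mpr ⟨b, hb, hxb⟩, hxa⟩
  · rintro ⟨x, hx, hxa⟩
    obtain ⟨b, hb, hxb⟩ := (hpool x).mp hx
    exact ⟨b, hb, x, hxa, hxb⟩

-- one board row: same fold over the oracle corners, cell by cell
lemma row_eq (cube : String × String × String × String × String × String)
    (oc : List (List Char)) (hoc : ∀ s ∈ oc, s ≠ []) (hc : ∀ s ∈ cornersA cube, s ≠ []) :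
    oc.foldl (fun row corner => row.insert (String.ofList corner) (hasMatchA corner cube))
        (PySem.Dict.empty : PySem.Dict String Bool)
      = oc.foldl (fun row corner =>
          row.insert (String.ofList corner) (!(PySem.Set.isdisjoint (poolB cube) (rotationsB corner))))
        (PySem.Dict.empty : PySem.Dict String Bool) := by
  apply PySem.List.foldl_congr_mem
  intro acc x hx
  rw [cell_eq x cube (hoc x hx) hc]

-- ===== VERDICT (by name: the statement is the Claim_ definition above) =====
theorem generate_chessboard_spec : Claim_equal_generate_chessboard := by
  intro cubes oracle_cube hDom hPre
  obtain ⟨hoc, hcs⟩ := hPre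
  unfold Spec_generate_chessboard
  simp only [generate_chessboard, generate_chessboard_alt]
  rw [← cornersA_eq_cornersB]
  apply congrArg PySem.Dict.items
  apply PySem.List.foldl_congr_mem
  intro board c hcmem
  rw [row_eq c (cornersA oracle_cube) hoc (hcs c hcmem)]
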